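-- pv_equiv track=rewrite | github.com/1211105932/codes | codewars/clean_up_after_your_dog.py | crap
-- ===== SOURCE A (Python) =====
-- def crap(garden, bags, cap):
--     cap *= bags
--
--     for i in garden:
--         for j in i:
--             if j == "D":
--                 return "Dog!!"
--             elif j == "@":
--                 cap -= 1
--
--     return "Cr@p" if cap < 0 else "Clean"
-- ===== SOURCE B (Python) =====
-- def crap(garden, bags, cap):
--     if any('D' in row for row in garden):
--         return "Dog!!"
--     total = sum(row.count('@') for row in garden)
--     return "Cr@p" if total > cap * bags else "Clean"
-- ===== Notes on version B (the rewrite author's own statement) =====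
-- stated objective: simpler
-- what changed: Replaces A's single interleaved early-exit character scan that decrements a capacity counter with two separate whole-grid passes: a dedicated dog-presence test, then a total poop count compared against cap*bags.
import Mathlib
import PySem

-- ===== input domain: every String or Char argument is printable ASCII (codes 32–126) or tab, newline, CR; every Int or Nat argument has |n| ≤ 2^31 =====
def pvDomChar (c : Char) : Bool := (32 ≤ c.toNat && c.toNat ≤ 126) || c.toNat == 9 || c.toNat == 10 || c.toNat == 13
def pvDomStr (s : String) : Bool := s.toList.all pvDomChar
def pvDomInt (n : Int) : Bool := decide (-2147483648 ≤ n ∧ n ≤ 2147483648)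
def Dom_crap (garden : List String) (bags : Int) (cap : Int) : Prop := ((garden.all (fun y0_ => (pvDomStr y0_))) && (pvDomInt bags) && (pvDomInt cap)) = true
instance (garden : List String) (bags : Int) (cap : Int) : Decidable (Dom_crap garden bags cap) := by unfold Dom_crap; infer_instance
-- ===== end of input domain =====

-- B replaces A's single interleaved early-exit character scan with two separate passes (dog-presence test, then total poop count); objective: simpler.

-- ===== PORT A =====
-- inner 'for j in i' loop: none = early return "Dog!!", some cap' = loop finished with updated cap
def crapGoRow : List Char → Int → Option Int
  | [], cap => some cap
  | j :: rest, cap =>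
    if j = 'D' then none
    else if j = '@' then crapGoRow rest (cap - 1)
    else crapGoRow rest cap

-- outer 'for i in garden' loop with the final conditional return
def crapGoRows : List String → Int → String
  | [], cap => if cap < 0 then "Cr@p" else "Clean"
  | i :: rest, cap =>
    match crapGoRow i.toList cap with
    | none => "Dog!!"
    | some cap' => crapGoRows rest cap'

def crap (garden : List String) (bags : Int) (cap : Int) : String :=
  crapGoRows garden (cap * bags)

-- ===== PORT B =====
def crap_alt (garden : List String) (bags : Int) (cap : Int) : String :=
  if garden.any (fun row => PySem.Str.isIn "D" row) then "Dog!!"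
  else
    let total : Int := (garden.map (fun row => (PySem.Str.count row "@" : Int))).sum
    if total > cap * bags then "Cr@p" else "Clean"

-- ===== PRECONDITION & SPEC =====
def Spec_crap (garden : List String) (bags : Int) (cap : Int) (out : String) : Prop := out = crap_alt garden bags cap
instance (garden : List String) (bags : Int) (cap : Int) (out : String) : Decidable (Spec_crap garden bags cap out) := by unfold Spec_crap; infer_instance

-- ===== CLAIM (what is proved, stated in full; the proofs are below) =====
def Claim_equal_crap : Prop := ∀ (garden : List String) (bags : Int) (cap : Int), Dom_crap garden bags cap → Spec_crap garden bags cap (crap garden bags cap)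

-- ===== LEMMAS AND PROOFS =====

-- Python s.count(sub) for a single-character sub is List.count
lemma countgo_singleton (c : Char) : ∀ (fuel : Nat) (l : List Char) (acc : Nat),
    l.length ≤ fuel → PySem.Chars.count.go [c] fuel l acc = acc + l.count c := by
  intro fuel
  induction fuel with
  | zero =>
    intro l acc h
    have : l = [] := List.length_eq_zero_iff.mp (Nat.le_zero.mp h)
    subst this; simp [PySem.Chars.count.go]
  | succ n ih =>
    intro l acc h
    cases l with
    | nil => simp [PySem.Chars.count.go]
    | cons x t =>
      simp only [PySem.Chars.count.go]
      by_cases hx : x = c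
      · subst hx
        have hp : [x].isPrefixOf (x :: t) = true := by simp [List.isPrefixOf]
        simp only [hp, List.length_singleton, List.drop_succ_cons, List.drop_zero]
        rw [ih t (acc + 1) (by simpa using Nat.lt_succ_iff.mp (by simpa using h))]
        simp
        omega
      · have hp : [c].isPrefixOf (x :: t) = false := by
          simp [List.isPrefixOf]
          exact fun hc => (hx hc.symm).elim
        simp only [hp]
        rw [ih t acc (by simpa using Nat.lt_succ_iff.mp (by simpa using h))]
        simp [hx]

lemma count_singleton (s : List Char) (c : Char) : PySem.Chars.count s [c] = s.count c := by
  have h := countgo_singleton c s.length s 0 le_rfl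
  simpa [PySem.Chars.count] using h

-- Python 'c in s' for a single character c is List.contains
lemma isIn_singleton (s : List Char) (c : Char) :
    PySem.Chars.isIn [c] s = s.contains c := by
  by_cases h : c ∈ s
  · rw [(PySem.Chars.isIn_iff_infix _ _).mpr]
    · simp [h]
    · obtain ⟨l₁, l₂, rfl⟩ := List.append_of_mem h
      exact ⟨l₁, l₂, by simp⟩
  · rw [(PySem.Chars.isIn_eq_false_iff _ _).mpr]
    · simp [h]
    · intro ⟨l₁, l₂, hl⟩
      exact h (by rw [← hl]; simp)

-- A's inner loop characterised: a 'D' anywhere ends the scan, otherwise the '@'s are subtracted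
lemma crapGoRow_eq (cs : List Char) : ∀ (cap : Int),
    crapGoRow cs cap = if cs.contains 'D' then none else some (cap - cs.count '@') := by
  induction cs with
  | nil => intro cap; simp [crapGoRow]
  | cons c rest ih =>
    intro cap
    by_cases hD : c = 'D'
    · subst hD; simp [crapGoRow]
    · by_cases hA : c = '@'
      · subst hA
        simp only [crapGoRow, if_neg (by decide : ¬('@' = 'D')), ih]
        simp
        split <;> simp
        ring
      · simp only [crapGoRow, if_neg hD, if_neg hA, ih]
        simp only [List.contains_cons]
        have h1 : ('D' == c) = false := by
          simp
          exact fun hc => hD hc.symm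
        simp [h1, hA]

-- A's outer loop characterised as B's two separate passes
lemma crapGoRows_eq (g : List String) : ∀ (cap : Int),
    crapGoRows g cap =
      if g.any (fun row => row.toList.contains 'D') then "Dog!!"
      else if cap - (g.map (fun row => (row.toList.count '@' : Int))).sum < 0 then "Cr@p" else "Clean" := by
  induction g with
  | nil => intro cap; simp [crapGoRows]
  | cons r rest ih =>
    intro cap
    simp only [crapGoRows, crapGoRow_eq]
    by_cases hD : r.toList.contains 'D' = true
    · rw [if_pos hD]
      have hany : ((r :: rest).any fun row => row.toList.contains 'D') = true := by
        simp only [List.any_cons, hD, Bool.true_or]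
      rw [hany]
      rfl
    · have hDf : r.toList.contains 'D' = false := eq_false_of_ne_true hD
      rw [hDf]
      simp only [Bool.false_eq_true, if_false]
      rw [ih]
      simp only [List.any_cons, hDf, Bool.false_or, List.map_cons, List.sum_cons]
      rw [sub_sub]
      rfl

-- ===== VERDICT (by name: the statement is the Claim_ definition above) =====
theorem crap_spec : Claim_equal_crap := by
  intro garden bags cap _
  unfold Spec_crap crap crap_alt
  rw [crapGoRows_eq]
  have hIn : ∀ row : String, PySem.Str.isIn "D" row = row.toList.contains 'D' := by
    intro row
    rw [PySem.Str.isIn_eq]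
    exact isIn_singleton row.toList 'D'
  have hCnt : ∀ row : String, PySem.Str.count row "@" = row.toList.count '@' := by
    intro row
    rw [PySem.Str.count_eq]
    exact count_singleton row.toList '@'
  simp only [hIn, hCnt]
  simp only [sub_neg, gt_iff_lt]
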